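-- pv_equiv track=rewrite | github.com/samuelncaetano/md2-new | ARITMETICA_MODULAR/7.py | criar_tabela_zn
-- ===== SOURCE A (Python) =====
-- def criar_tabela_zn(n):
--     tabela = []
--     for i in range(n):
--         linha = []
--         for j in range(n):
--             valor = (i + j) % n
--             linha.append(valor)
--         tabela.append(linha)
--     return tabela
-- ===== SOURCE B (Python) =====
-- def criar_tabela_zn(n):
--     base = list(range(n))
--     return [base[i:] + base[:i] for i in base]
-- ===== Notes on version B (the rewrite author's own statement) =====
-- stated objective: simpler
-- what changed: B computes the base row list(range(n)) once and produces each row as the cyclic rotation base[i:]+base[:i] via slicing, eliminating the inner arithmetic loop that recomputes (i+j)%n for every cell.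
import Mathlib
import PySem

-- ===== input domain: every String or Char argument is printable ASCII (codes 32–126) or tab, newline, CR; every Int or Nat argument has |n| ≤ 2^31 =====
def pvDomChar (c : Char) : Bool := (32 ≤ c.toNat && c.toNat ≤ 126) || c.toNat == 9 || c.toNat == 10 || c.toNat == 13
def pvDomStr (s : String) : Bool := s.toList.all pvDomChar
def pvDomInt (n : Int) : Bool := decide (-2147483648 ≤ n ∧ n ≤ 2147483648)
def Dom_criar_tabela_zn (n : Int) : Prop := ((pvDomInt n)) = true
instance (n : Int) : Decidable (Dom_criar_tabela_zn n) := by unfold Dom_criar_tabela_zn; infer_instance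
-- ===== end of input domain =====

-- B builds the base row list(range(n)) once and emits each row as the slice rotation
-- base[i:] + base[:i], removing the inner (i+j) % n loop; objective: simpler.


-- ===== PORT A =====
def criar_tabela_zn (n : Int) : List (List Int) :=
  (PySem.List.pyRange 0 n 1).foldl
    (fun tabela i =>
      tabela ++ [(PySem.List.pyRange 0 n 1).foldl
        (fun linha j => linha ++ [PySem.Int.mod (i + j) n]) []])
    []

-- ===== PORT B =====
def criar_tabela_zn_alt (n : Int) : List (List Int) :=
  let base := PySem.List.pyRange 0 n 1
  base.map (fun i => PySem.List.slice base (some i) none ++ PySem.List.slice base none (some i))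

-- ===== PRECONDITION & SPEC =====
def Spec_criar_tabela_zn (n : Int) (out : List (List Int)) : Prop := out = criar_tabela_zn_alt n
instance (n : Int) (out : List (List Int)) : Decidable (Spec_criar_tabela_zn n out) := by unfold Spec_criar_tabela_zn; infer_instance

-- ===== CLAIM (what is proved, stated in full; the proofs are below) =====
def Claim_equal_criar_tabela_zn : Prop := ∀ (n : Int), Dom_criar_tabela_zn n → Spec_criar_tabela_zn n (criar_tabela_zn n)

-- ===== LEMMAS AND PROOFS =====

-- For 0 ≤ i < n, the A-row [(i+j) % n for j in range(n)] is the rotation of range(n) by i.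
lemma row_eq_rotation (n i : Int) (hi0 : 0 ≤ i) (hin : i < n) :
    (PySem.List.pyRange 0 n 1).map (fun j => PySem.Int.mod (i + j) n)
      = (PySem.List.pyRange 0 n 1).drop i.toNat ++ (PySem.List.pyRange 0 n 1).take i.toNat := by
  have hn : (0:Int) < n := lt_of_le_of_lt hi0 hin
  have hsplit := PySem.List.pyRange_one_append 0 (n - i) n (by omega) (by omega)
  have hsplit2 := PySem.List.pyRange_one_append 0 i n hi0 (le_of_lt hin)
  have h1 : (PySem.List.pyRange 0 (n - i) 1).map (fun j => PySem.Int.mod (i + j) n)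
      = PySem.List.pyRange i n 1 := by
    rw [PySem.List.pyRange_one 0 (n - i), PySem.List.pyRange_one i n, List.map_map]
    simp only [sub_zero]
    apply List.map_congr_left
    intro k hk
    simp only [List.mem_range] at hk
    have hk' : (k : Int) < n - i := by omega
    simp only [Function.comp]
    rw [PySem.Int.mod_eq_emod_of_pos hn, Int.emod_eq_of_lt (by omega) (by omega)]
    ring
  have h2 : (PySem.List.pyRange (n - i) n 1).map (fun j => PySem.Int.mod (i + j) n)
      = PySem.List.pyRange 0 i 1 := by
    rw [PySem.List.pyRange_one (n - i) n, PySem.List.pyRange_one 0 i, List.map_map]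
    simp only [sub_zero, show n - (n - i) = i from by ring]
    apply List.map_congr_left
    intro k hk
    simp only [List.mem_range] at hk
    have hk' : (k : Int) < i := by omega
    simp only [Function.comp]
    have : PySem.Int.mod (i + (n - i + k)) n = PySem.Int.mod (k : Int) n := by
      rw [PySem.Int.mod_eq_emod_of_pos hn, PySem.Int.mod_eq_emod_of_pos hn]
      have : i + (n - i + (k:Int)) = (k:Int) + n * 1 := by ring
      rw [this, Int.add_mul_emod_self_left]
    rw [this, PySem.Int.mod_eq_emod_of_pos hn, Int.emod_eq_of_lt (by omega) (by omega)]
    ring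
  have hlen : (PySem.List.pyRange 0 i 1).length = i.toNat := by
    rw [PySem.List.length_pyRange_one]; omega
  have hdrop : (PySem.List.pyRange 0 n 1).drop i.toNat = PySem.List.pyRange i n 1 := by
    rw [hsplit2, ← hlen, List.drop_left]
  have htake : (PySem.List.pyRange 0 n 1).take i.toNat = PySem.List.pyRange 0 i 1 := by
    rw [hsplit2, ← hlen, List.take_left]
  rw [hdrop, htake, hsplit, List.map_append, h1, h2]

theorem criar_tabela_zn_spec : Claim_equal_criar_tabela_zn := by
  intro n _
  unfold Spec_criar_tabela_zn criar_tabela_zn criar_tabela_zn_alt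
  rw [PySem.List.foldl_append_singleton_eq_map]
  apply List.map_congr_left
  intro i hi
  rw [PySem.List.mem_pyRange_one] at hi
  rw [PySem.List.foldl_append_singleton_eq_map]
  rw [PySem.List.slice_from _ hi.1, PySem.List.slice_to _ hi.1]
  simp only [List.nil_append]
  exact row_eq_rotation n i hi.1 hi.2
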